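-- pv_equiv track=rewrite | github.com/elizabethonafuwa/CodingAssessment | main.py | find_pairs_available
-- ===== SOURCE A (Python) =====
-- def find_pairs_available(theater_seats):
--     pairs_available = []  # Tracks all available pairs
--
--     for row in theater_seats[1:]:  # Iterate through each row of theater_seats
--         for index in range(len(row) - 1):  # Iterate through each seat in the row (-1 because we start at index 1)
--             if row[index] == 'o' and row[index + 1] == 'o':  # Checks for a pair of available seats
--                 pairs = f"{row[0]}{theater_seats[0][index]}{theater_seats[0][index + 1]}"  # Add pairs of available seats
--                 pairs_available.append(pairs)
--     return pairs_available  # Return list of available pairs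
-- ===== SOURCE B (Python) =====
-- def _row_pairs(header, row):
--     # positions of available seats, then adjacent-position scan
--     os = [i for i, seat in enumerate(row) if seat == 'o']
--     return [f"{row[0]}{header[p]}{header[q]}"
--             for p, q in zip(os, os[1:]) if q == p + 1]
--
--
-- def find_pairs_available(theater_seats):
--     if not theater_seats:
--         return []
--     header, *rows = theater_seats
--     result = []
--     for row in rows:
--         result += _row_pairs(header, row)
--     return result
-- ===== Notes on version B (the rewrite author's own statement) =====
-- stated objective: alternative
-- what changed: B replaces A's per-index scan comparing row[i] and row[i+1] with a two-phase pass: extract the positions of 'o' seats per row, then scan adjacent pairs of that position list for consecutive positions.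
import Mathlib
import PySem

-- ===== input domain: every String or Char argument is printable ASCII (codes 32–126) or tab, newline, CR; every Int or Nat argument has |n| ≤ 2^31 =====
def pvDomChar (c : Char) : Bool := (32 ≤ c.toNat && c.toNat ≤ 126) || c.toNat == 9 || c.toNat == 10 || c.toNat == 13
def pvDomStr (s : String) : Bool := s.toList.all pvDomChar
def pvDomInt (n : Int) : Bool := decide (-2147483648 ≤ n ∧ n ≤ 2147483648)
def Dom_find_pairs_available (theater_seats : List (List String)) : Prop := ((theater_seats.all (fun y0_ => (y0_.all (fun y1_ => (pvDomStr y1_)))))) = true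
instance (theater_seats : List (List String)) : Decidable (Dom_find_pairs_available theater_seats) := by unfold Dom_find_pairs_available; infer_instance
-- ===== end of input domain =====

-- B replaces A's index scan `row[i]=='o' and row[i+1]=='o'` by extracting the positions of
-- available seats per row and scanning that position list for adjacent pairs (objective:
-- alternative algorithm, same cost).

-- ===== PORT A =====
-- inner loop of A: `for index in range(len(row) - 1): if row[index]=='o' and row[index+1]=='o': ... append`
def pvA_row (header row : List String) (pairs_available : List String) : List String :=
  (PySem.List.pyRange 0 (PySem.List.len row - 1) 1).foldl
    (fun acc index =>
      if PySem.List.pyGetD row index "" == "o" && PySem.List.pyGetD row (index + 1) "" == "o" then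
        acc ++ [PySem.List.pyGetD row 0 "" ++ PySem.List.pyGetD header index "" ++
                PySem.List.pyGetD header (index + 1) ""]
      else acc)
    pairs_available

def find_pairs_available (theater_seats : List (List String)) : List String :=
  (PySem.List.slice theater_seats (some 1) none).foldl
    (fun pairs_available row => pvA_row (PySem.List.pyGetD theater_seats 0 []) row pairs_available) []

-- ===== PORT B =====
-- B's helper _row_pairs: positions of 'o' seats, then a scan of adjacent position pairs
def pvB_row (header row : List String) : List String :=
  let os := ((PySem.List.enumerate row 0).filter (fun p => p.2 == "o")).map (fun p => p.1)
  ((os.zip os.tail).filter (fun pq => pq.2 == pq.1 + 1)).map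
    (fun pq => PySem.List.pyGetD row 0 "" ++ PySem.List.pyGetD header pq.1 "" ++
               PySem.List.pyGetD header pq.2 "")

def find_pairs_available_alt (theater_seats : List (List String)) : List String :=
  match theater_seats with
  | [] => []
  | header :: rows => rows.foldl (fun result row => result ++ pvB_row header row) []

-- ===== PRECONDITION & SPEC =====
-- Pre_ excludes exactly the inputs on which Python A raises IndexError: a pair of adjacent
-- 'o' seats in some later row at a position reaching past the end of the first (header) row.
def Pre_find_pairs_available (theater_seats : List (List String)) : Prop :=
  ∀ row ∈ theater_seats.tail, ∀ k < row.length - 1,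
    row.getD k "" = "o" → row.getD (k + 1) "" = "o" →
      k + 1 < (theater_seats.headD []).length
instance (theater_seats : List (List String)) : Decidable (Pre_find_pairs_available theater_seats) := by
  unfold Pre_find_pairs_available; infer_instance

def pvWitness_find_pairs_available : List (List String) :=
  [["x", "1", "2"], ["A", "o", "o"]]

def Spec_find_pairs_available (theater_seats : List (List String)) (out : List String) : Prop := out = find_pairs_available_alt theater_seats
instance (theater_seats : List (List String)) (out : List String) : Decidable (Spec_find_pairs_available theater_seats out) := by unfold Spec_find_pairs_available; infer_instance

-- ===== CLAIM (what is proved, stated in full; the proofs are below) =====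
def Claim_equal_find_pairs_available : Prop := ∀ (theater_seats : List (List String)), Dom_find_pairs_available theater_seats → Pre_find_pairs_available theater_seats → Spec_find_pairs_available theater_seats (find_pairs_available theater_seats)

-- ===== LEMMAS AND PROOFS =====

-- the per-row result, in index form (common target of both ports' inner loops)
def rowSpec (header row : List String) : List String :=
  ((List.range (row.length - 1)).filter
      (fun k => row.getD k "" == "o" && row.getD (k + 1) "" == "o")).map
    (fun k => row.getD 0 "" ++ header.getD k "" ++ header.getD (k + 1) "")

lemma pyGetD_cast_succ {α : Type} (xs : List α) (k : Nat) (d : α) :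
    PySem.List.pyGetD xs ((k : Int) + 1) d = xs.getD (k + 1) d := by
  rw [show ((k : Int) + 1) = ((k + 1 : Nat) : Int) by push_cast; ring,
    PySem.List.pyGetD_natCast]

lemma pvA_row_eq (header row acc : _) :
    pvA_row header row acc = acc ++ rowSpec header row := by
  unfold pvA_row rowSpec
  rw [PySem.List.pyRange_one]
  have hm : ((PySem.List.len row - 1) - 0).toNat = row.length - 1 := by
    simp [PySem.List.len_eq]
  rw [hm, List.foldl_map, PySem.List.foldl_append_if]
  congr 1
  rw [List.filter_congr (q := fun k => row.getD k "" == "o" && row.getD (k + 1) "" == "o")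
        (by intro k _; rw [zero_add, pyGetD_cast_succ]; simp)]
  refine List.map_congr_left ?_
  intro k _
  rw [zero_add, pyGetD_cast_succ]
  simp [PySem.List.pyGetD_zero]

-- B-side abbreviations (proof helpers)
def osL (row : List String) (s : Int) : List Int :=
  ((PySem.List.enumerate row s).filter (fun p => p.2 == "o")).map (fun p => p.1)

def fmL (header : List String) (L : String) (os : List Int) : List String :=
  ((os.zip os.tail).filter (fun pq => pq.2 == pq.1 + 1)).map
    (fun pq => L ++ PySem.List.pyGetD header pq.1 "" ++ PySem.List.pyGetD header pq.2 "")

lemma pvB_row_eq_fmL (header row : List String) :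
    pvB_row header row = fmL header (row.getD 0 "") (osL row 0) := by
  simp [pvB_row, fmL, osL, PySem.List.pyGetD_zero]

lemma osL_nil (s : Int) : osL [] s = [] := rfl

lemma osL_cons (a : String) (rest : List String) (s : Int) :
    osL (a :: rest) s = (if a == "o" then [s] else []) ++ osL rest (s + 1) := by
  cases h : a == "o" <;> simp [osL, PySem.List.enumerate_cons, h]

lemma osL_ge (row : List String) : ∀ (s : Int), ∀ q ∈ osL row s, s ≤ q := by
  induction row with
  | nil => intro s q hq; simp [osL_nil] at hq
  | cons a rest ih =>
    intro s q hq
    rw [osL_cons] at hq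
    rcases List.mem_append.1 hq with h | h
    · rcases Bool.eq_false_or_eq_true (a == "o") with ha | ha <;> simp [ha] at h
      omega
    · have := ih (s + 1) q h; omega

lemma fmL_nil (header : List String) (L : String) : fmL header L [] = [] := rfl

lemma fmL_singleton (header : List String) (L : String) (x : Int) :
    fmL header L [x] = [] := rfl

lemma fmL_cons_cons (header : List String) (L : String) (x q : Int) (t : List Int) :
    fmL header L (x :: q :: t) =
      (if q == x + 1 then
        [L ++ PySem.List.pyGetD header x "" ++ PySem.List.pyGetD header q ""] else []) ++
      fmL header L (q :: t) := by
  cases h : q == x + 1 <;> simp [fmL, h]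

lemma fm_osL (header : List String) (L : String) :
    ∀ (row : List String) (s : Nat),
      fmL header L (osL row (s : Int)) =
        ((List.range (row.length - 1)).filter
            (fun k => row.getD k "" == "o" && row.getD (k + 1) "" == "o")).map
          (fun k => L ++ header.getD (s + k) "" ++ header.getD (s + k + 1) "") := by
  intro row
  induction row with
  | nil => intro s; simp [osL_nil, fmL_nil]
  | cons a rest ih =>
    intro s
    have hcast : ((s : Int) + 1) = ((s + 1 : Nat) : Int) := by push_cast; ring
    rw [osL_cons, hcast]
    cases rest with
    | nil =>
      cases h : a == "o" <;>
        simp [osL_nil, fmL_nil, fmL_singleton]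

    | cons b r =>
      -- right-hand side: split off index 0
      have hrhs :
          ((List.range ((a :: b :: r).length - 1)).filter
              (fun k => (a :: b :: r).getD k "" == "o" && (a :: b :: r).getD (k + 1) "" == "o")).map
            (fun k => L ++ header.getD (s + k) "" ++ header.getD (s + k + 1) "")
          = (if a == "o" && b == "o" then
              [L ++ header.getD s "" ++ header.getD (s + 1) ""] else []) ++
            ((List.range ((b :: r).length - 1)).filter
                (fun k => (b :: r).getD k "" == "o" && (b :: r).getD (k + 1) "" == "o")).map
              (fun k => L ++ header.getD (s + 1 + k) "" ++ header.getD (s + 1 + k + 1) "") := by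
        have hr : (a :: b :: r).length - 1 = ((b :: r).length - 1) + 1 := by simp
        rw [hr, List.range_succ_eq_map]
        cases hab : (a == "o" && b == "o") <;>
          · simp only [List.filter_cons, List.getD_cons_zero, List.getD_cons_succ, hab,
              List.filter_map]
            simp [List.map_map, Function.comp_def,
              Nat.add_right_comm, Nat.add_assoc, Nat.add_comm 1]
      rw [hrhs, ← ih (s + 1)]
      cases ha : a == "o" with
      | false => simp
      | true =>
        simp only [if_true, Bool.true_and, List.singleton_append]
        rw [osL_cons b r ((s + 1 : Nat) : Int)]
        cases hb : b == "o" with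
        | true =>
          simp only [if_true, List.singleton_append]
          rw [fmL_cons_cons]
          have heq : ((((s + 1 : Nat) : Int)) == (s : Int) + 1) = true := by
            rw [hcast]; exact beq_self_eq_true _
          rw [heq]
          simp only [if_true, PySem.List.pyGetD_natCast,
            List.cons_append, List.nil_append]
        | false =>
          -- a == "o", b ≠ "o": head of the remaining positions (if any) is ≥ s+2, no pair at s
          simp only [Bool.false_eq_true, if_false, List.nil_append]
          cases hos : osL r (((s + 1 : Nat) : Int) + 1) with
          | nil => simp [fmL_singleton, fmL_nil]
          | cons q t =>
            have hq : ((s + 1 : Nat) : Int) + 1 ≤ q :=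
              osL_ge r _ q (by rw [hos]; exact List.mem_cons_self ..)
            have hne : (q == (s : Int) + 1) = false := by
              have : q ≠ (s : Int) + 1 := by push_cast at hq ⊢; omega
              simpa using this
            rw [fmL_cons_cons, hne]
            simp

lemma pvB_row_eq (header row : List String) :
    pvB_row header row = rowSpec header row := by
  rw [pvB_row_eq_fmL, rowSpec]
  have h0 : (0 : Int) = ((0 : Nat) : Int) := by norm_num
  rw [h0, fm_osL header (row.getD 0 "") row 0]
  simp

theorem find_pairs_available_spec : Claim_equal_find_pairs_available := by
  intro ts _ _
  unfold Spec_find_pairs_available find_pairs_available find_pairs_available_alt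
  cases ts with
  | nil => rfl
  | cons header rows =>
    rw [PySem.List.slice_from_one]
    simp only [List.tail_cons, PySem.List.pyGetD_zero_cons]
    rw [PySem.List.foldl_congr_mem rows _ (fun acc row => acc ++ rowSpec header row) []
          (by intro acc row _; exact pvA_row_eq header row acc),
        PySem.List.foldl_append_eq_flatMap,
        PySem.List.foldl_append_eq_flatMap]
    exact congrArg _ (List.flatMap_congr (fun row _ => (pvB_row_eq header row).symm))
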